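-- pv_equiv track=rewrite | github.com/PritamDutt/compliance-trestle | trestle/core/control_interface.py | bad_header
-- ===== SOURCE A (Python) =====
-- def bad_header(header: str) -> bool:
--     """Return true if header format is bad."""
--     if not header or header[0] != '#':
--         return True
--     n = len(header)
--     if n < 2:
--         return True
--     for ii in range(1, n):
--         if header[ii] == ' ':
--             return False
--         if header[ii] != '#':
--             return True
--     return True
-- ===== SOURCE B (Python) =====
-- import re
--
-- _HEADER_RE = re.compile(r'#+ ')
--
-- def bad_header(header: str) -> bool:
--     """Return true if header format is bad."""
--     return not _HEADER_RE.match(header)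
-- ===== Notes on version B (the rewrite author's own statement) =====
-- stated objective: idiomatic
-- what changed: Replaced the explicit index loop with length guards by a single anchored regex match r'#+ ' (one-or-more leading hashes followed by a space), negated to keep the bad-header polarity.
import Mathlib
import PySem

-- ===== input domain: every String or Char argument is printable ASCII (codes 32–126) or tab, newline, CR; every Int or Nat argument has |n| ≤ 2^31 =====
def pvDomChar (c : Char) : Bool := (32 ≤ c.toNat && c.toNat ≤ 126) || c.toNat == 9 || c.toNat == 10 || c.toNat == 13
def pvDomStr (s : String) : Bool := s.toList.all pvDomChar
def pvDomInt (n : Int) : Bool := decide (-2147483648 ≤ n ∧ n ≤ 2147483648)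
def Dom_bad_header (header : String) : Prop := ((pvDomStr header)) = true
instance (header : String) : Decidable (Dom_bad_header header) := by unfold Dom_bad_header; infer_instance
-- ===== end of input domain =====

-- B replaces A's explicit character loop and length guards with a single anchored
-- regex match r'#+ ' (ported as: leading-hash run followed by a space), negated — more idiomatic.


-- ===== PORT A =====
-- the 'for ii in range(1, n)' loop over the remaining characters
def badHeaderLoop : List Char → Bool
  | [] => true
  | c :: rest =>
    if c = ' ' then false
    else if c ≠ '#' then true
    else badHeaderLoop rest

def bad_header (header : String) : Bool :=
  match header.toList with
  | [] => true                              -- not header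
  | c :: rest =>
    if c ≠ '#' then true                    -- header[0] != '#'
    else if (c :: rest).length < 2 then true  -- n < 2
    else badHeaderLoop rest

-- ===== PORT B =====
-- anchored re.match r'#+ ': a maximal run of ≥ 1 leading '#' followed by ' '
-- (greedy '#+' with a ' ' after it matches iff the takeWhile run is followed by a space)
def bad_header_alt (header : String) : Bool :=
  let cs := header.toList
  let hashes := cs.takeWhile (· = '#')
  let matched :=
    decide (1 ≤ hashes.length) &&
      (match cs.drop hashes.length with
       | ' ' :: _ => true
       | _ => false)
  !matched

-- ===== PRECONDITION & SPEC =====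
def Spec_bad_header (header : String) (out : Bool) : Prop := out = bad_header_alt header
instance (header : String) (out : Bool) : Decidable (Spec_bad_header header out) := by unfold Spec_bad_header; infer_instance

-- ===== CLAIM (what is proved, stated in full; the proofs are below) =====
def Claim_equal_bad_header : Prop := ∀ (header : String), Dom_bad_header header → Spec_bad_header header (bad_header header)

-- ===== LEMMAS AND PROOFS =====

theorem badHeaderLoop_eq_tail (rest : List Char) :
    badHeaderLoop rest =
      !(match rest.drop (rest.takeWhile (· = '#')).length with
        | ' ' :: _ => true
        | _ => false) := by
  induction rest with
  | nil => rfl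
  | cons c t ih =>
    by_cases hs : c = ' '
    · subst hs; simp [badHeaderLoop, List.takeWhile]
    · by_cases hh : c = '#'
      · subst hh
        simpa [badHeaderLoop, List.takeWhile] using ih
      · simp [badHeaderLoop, hs, hh, List.takeWhile]

-- ===== VERDICT (by name: the statement is the Claim_ definition above) =====
theorem bad_header_spec : Claim_equal_bad_header := by
  intro header _
  unfold Spec_bad_header bad_header bad_header_alt
  cases hcs : header.toList with
  | nil => simp
  | cons c rest =>
    by_cases hh : c = '#'
    · subst hh
      cases rest with
      | nil => simp [List.takeWhile]
      | cons d t =>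
        simp only [List.length_cons, List.takeWhile]
        have := badHeaderLoop_eq_tail (d :: t)
        simp [this, List.takeWhile]
    · simp [hh, List.takeWhile]
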